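-- pv_equiv track=rewrite | github.com/livlevi/code-projects | adventofcode/2015/day11/main02.py | pairsLetters
-- ===== SOURCE A (Python) =====
-- def pairsLetters(s):
--     for i in range(len(s) - 2):
--         if s[i] == s[i+1]:
--             j = i
--             while j <= len(s) - 2:
--                 if s[j] == s[j+1] and s[i] != s[j] and s[i+1] != s[j+1]:
--                     return True
--                 j += 1
--     return False
-- ===== SOURCE B (Python) =====
-- def pairsLetters(s):
--     # Scan maximal runs of equal characters; collect the letters of runs of
--     # length >= 2; two distinct such letters means two different pairs.
--     seen = set()
--     n = len(s)
--     i = 0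
--     while i < n:
--         j = i + 1
--         while j < n and s[j] == s[i]:
--             j += 1
--         if j - i >= 2:
--             seen.add(s[i])
--             if len(seen) == 2:
--                 return True
--         i = j
--     return False
-- ===== Notes on version B (the rewrite author's own statement) =====
-- stated objective: faster
-- what changed: Replaces A's nested index-pair scan (for each double, rescan the rest of the string for a double of another letter) by a single left-to-right pass over maximal runs of equal characters that maintains the set of doubled letters and stops once it holds two.
import Mathlib
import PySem

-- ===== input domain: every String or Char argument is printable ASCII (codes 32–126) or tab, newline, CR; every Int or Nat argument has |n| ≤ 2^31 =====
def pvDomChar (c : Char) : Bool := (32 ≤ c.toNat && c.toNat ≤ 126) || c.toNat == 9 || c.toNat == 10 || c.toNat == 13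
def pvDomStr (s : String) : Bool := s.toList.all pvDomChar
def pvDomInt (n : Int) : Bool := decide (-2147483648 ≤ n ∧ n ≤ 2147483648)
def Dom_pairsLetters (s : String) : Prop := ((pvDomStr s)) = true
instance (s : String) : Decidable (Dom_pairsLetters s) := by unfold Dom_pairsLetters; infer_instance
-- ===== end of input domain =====

-- B replaces A's nested index-pair scan by one pass over maximal runs of equal
-- characters, maintaining the set of doubled letters: one pass instead of A's nested rescans.


-- ===== PORT A =====
-- inner 'while j <= len(s) - 2' loop of A ('return True' on the guarded hit)
def innerA (cs : List Char) (i j : Nat) : Bool :=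
  if j + 2 ≤ cs.length then
    if cs.getD j ' ' = cs.getD (j+1) ' ' ∧ cs.getD i ' ' ≠ cs.getD j ' ' ∧
        cs.getD (i+1) ' ' ≠ cs.getD (j+1) ' ' then true
    else innerA cs i (j+1)
  else false
termination_by cs.length - j

def pairsLetters (s : String) : Bool :=
  let cs := s.toList
  (List.range (cs.length - 2)).any fun i =>
    if cs.getD i ' ' = cs.getD (i+1) ' ' then innerA cs i i else false

-- ===== PORT B =====
-- Source B's outer while loop; the inner while that moves j past the maximal run of
-- equal characters is ported as takeWhile/dropWhile on the tail (same boundary j).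
def altGo (cs : List Char) (seen : PySem.Set Char) : Bool :=
  match cs with
  | [] => false
  | c :: rest =>
    let run := rest.takeWhile (fun x => x = c)
    let rest' := rest.dropWhile (fun x => x = c)
    if 1 + run.length ≥ 2 then
      let seen' := PySem.Set.add seen c
      if seen'.length = 2 then true else altGo rest' seen'
    else altGo rest' seen
termination_by cs.length
decreasing_by
  all_goals simpa using Nat.lt_succ_of_le (rest.length_dropWhile_le _)

def pairsLetters_alt (s : String) : Bool := altGo s.toList PySem.Set.empty

-- ===== PRECONDITION & SPEC =====
def Spec_pairsLetters (s : String) (out : Bool) : Prop := out = pairsLetters_alt s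
instance (s : String) (out : Bool) : Decidable (Spec_pairsLetters s out) := by unfold Spec_pairsLetters; infer_instance

-- ===== CLAIM (what is proved, stated in full; the proofs are below) =====
def Claim_equal_pairsLetters : Prop := ∀ (s : String), Dom_pairsLetters s → Spec_pairsLetters s (pairsLetters s)

-- ===== LEMMAS AND PROOFS =====
def Dbl (cs : List Char) (x : Char) : Prop := (x, x) ∈ cs.zip cs.tail

theorem dbl_iff_getD (cs : List Char) (x : Char) :
    Dbl cs x ↔ ∃ i, i + 1 < cs.length ∧ cs.getD i ' ' = x ∧ cs.getD (i+1) ' ' = x := by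
  unfold Dbl
  rw [List.mem_iff_getElem]
  constructor
  · rintro ⟨i, h, hget⟩
    have hlen : i + 1 < cs.length := by
      simp only [List.length_zip, List.length_tail] at h; omega
    rw [List.getElem_zip] at hget
    have ht : cs.tail[i]'(by simp [List.length_tail]; omega) = cs[i+1]'hlen := by
      simp [List.getElem_tail]
    rw [ht] at hget
    obtain ⟨h1, h2⟩ := Prod.mk.injEq .. ▸ hget
    exact ⟨i, hlen, by rw [List.getD_eq_getElem cs ' ' (by omega)]; exact h1,
      by rw [List.getD_eq_getElem cs ' ' hlen]; exact h2⟩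
  · rintro ⟨i, hlen, h1, h2⟩
    refine ⟨i, by simp only [List.length_zip, List.length_tail]; omega, ?_⟩
    rw [List.getElem_zip]
    have ht : cs.tail[i]'(by simp [List.length_tail]; omega) = cs[i+1]'hlen := by
      simp [List.getElem_tail]
    rw [List.getD_eq_getElem cs ' ' (by omega : i < cs.length)] at h1
    rw [List.getD_eq_getElem cs ' ' hlen] at h2
    rw [ht, h1, h2]

theorem dbl_cons_run (c : Char) (rest : List Char) (x : Char) :
    Dbl (c :: rest) x ↔
      (x = c ∧ rest.takeWhile (fun y => y = c) ≠ []) ∨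
      Dbl (rest.dropWhile (fun y => y = c)) x := by
  induction rest generalizing c with
  | nil => simp [Dbl]
  | cons b t ih =>
    by_cases hbc : b = c
    · subst hbc
      have h1 : Dbl (b :: b :: t) x ↔ x = b ∨ Dbl (b :: t) x := by
        simp only [Dbl, List.zip_cons_cons, List.tail_cons, List.mem_cons, Prod.mk.injEq]
        constructor
        · rintro (⟨h, -⟩ | h)
          · exact Or.inl h
          · exact Or.inr h
        · rintro (rfl | h)
          · exact Or.inl ⟨rfl, rfl⟩
          · exact Or.inr h
      rw [h1, ih b]
      rw [List.takeWhile_cons, List.dropWhile_cons]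
      simp only [decide_true, reduceIte]
      constructor
      · rintro (rfl | (⟨rfl, -⟩ | h))
        · exact Or.inl ⟨rfl, by simp⟩
        · exact Or.inl ⟨rfl, by simp⟩
        · exact Or.inr h
      · rintro (⟨rfl, -⟩ | h)
        · exact Or.inl rfl
        · exact Or.inr (Or.inr h)
    · rw [List.takeWhile_cons, List.dropWhile_cons]
      simp only [decide_eq_true_eq, if_neg hbc]
      have h1 : Dbl (c :: b :: t) x ↔ (x = c ∧ x = b) ∨ Dbl (b :: t) x := by
        simp only [Dbl, List.zip_cons_cons, List.tail_cons, List.mem_cons, Prod.mk.injEq]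
      rw [h1]
      constructor
      · rintro (⟨rfl, rfl⟩ | h)
        · exact absurd rfl hbc
        · exact Or.inr h
      · rintro (⟨-, h⟩ | h)
        · simp at h
        · exact Or.inr h

-- the proposition both programs decide: two pairs of different letters
def TwoPairs (cs : List Char) : Prop := ∃ c d, c ≠ d ∧ Dbl cs c ∧ Dbl cs d

-- ----- A-side -----

theorem innerA_sound (cs : List Char) (i j : Nat) (h : innerA cs i j = true) :
    ∃ k, j ≤ k ∧ k + 1 < cs.length ∧ cs.getD k ' ' = cs.getD (k+1) ' ' ∧
      cs.getD i ' ' ≠ cs.getD k ' ' := by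
  fun_induction innerA cs i j with
  | case1 j hle hc => exact ⟨j, le_rfl, by omega, hc.1, hc.2.1⟩
  | case2 j hle hc ih =>
      obtain ⟨k, hk, h2, h3, h4⟩ := ih h
      exact ⟨k, by omega, h2, h3, h4⟩
  | case3 j hle => simp at h

theorem innerA_complete (cs : List Char) (i j k : Nat) (hjk : j ≤ k)
    (hk : k + 2 ≤ cs.length) (hpair : cs.getD k ' ' = cs.getD (k+1) ' ')
    (hne : cs.getD i ' ' ≠ cs.getD k ' ') (hne' : cs.getD (i+1) ' ' ≠ cs.getD (k+1) ' ') :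
    innerA cs i j = true := by
  fun_induction innerA cs i j with
  | case1 j hle hc => rfl
  | case2 j hle hc ih =>
      rcases Nat.eq_or_lt_of_le hjk with rfl | hlt
      · exact absurd ⟨hpair, hne, hne'⟩ hc
      · exact ih (by omega)
  | case3 j hle => omega

theorem pairsLetters_iff (s : String) :
    pairsLetters s = true ↔ TwoPairs s.toList := by
  unfold pairsLetters
  set cs := s.toList with hcs
  rw [List.any_eq_true]
  constructor
  · rintro ⟨i, hi, hcond⟩
    rw [List.mem_range] at hi
    split at hcond
    case isTrue heq =>
      obtain ⟨k, hjk, hk1, hkpair, hkne⟩ := innerA_sound cs i i hcond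
      refine ⟨cs.getD i ' ', cs.getD k ' ', hkne, ?_, ?_⟩
      · rw [dbl_iff_getD]; exact ⟨i, by omega, rfl, heq.symm⟩
      · rw [dbl_iff_getD]; exact ⟨k, hk1, rfl, hkpair.symm⟩
    case isFalse => simp at hcond
  · rintro ⟨c, d, hcd, hc, hd⟩
    rw [dbl_iff_getD] at hc hd
    obtain ⟨p, hp, hp1, hp2⟩ := hc
    obtain ⟨q, hq, hq1, hq2⟩ := hd
    have hpq : p ≠ q := by rintro rfl; exact hcd (hp1.symm.trans hq1)
    rcases Nat.lt_or_ge p q with hlt | hge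
    · refine ⟨p, by rw [List.mem_range]; omega, ?_⟩
      rw [if_pos (hp1.trans hp2.symm)]
      exact innerA_complete cs p p q (by omega) (by omega) (hq1.trans hq2.symm)
        (by rw [hp1, hq1]; exact hcd) (by rw [hp2, hq2]; exact hcd)
    · have hlt : q < p := by omega
      refine ⟨q, by rw [List.mem_range]; omega, ?_⟩
      rw [if_pos (hq1.trans hq2.symm)]
      exact innerA_complete cs q q p (by omega) (by omega) (hp1.trans hp2.symm)
        (by rw [hq1, hp1]; exact fun h => hcd h.symm)
        (by rw [hq2, hp2]; exact fun h => hcd h.symm)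

-- ----- B-side -----

theorem nodup_two_mem (l : List Char) (hnd : l.Nodup) (h : 2 ≤ l.length) :
    ∃ a b, a ∈ l ∧ b ∈ l ∧ a ≠ b := by
  rcases l with _ | ⟨x, _ | ⟨y, t⟩⟩
  · simp at h
  · simp at h
  · refine ⟨x, y, by simp, by simp, ?_⟩
    simp only [List.nodup_cons, List.mem_cons] at hnd
    exact fun hxy => hnd.1 (Or.inl hxy)

theorem altGo_iff (cs : List Char) (seen : PySem.Set Char) :
    seen.Nodup → seen.length ≤ 1 →
    (altGo cs seen = true ↔
      ∃ c d, c ≠ d ∧ (c ∈ seen ∨ Dbl cs c) ∧ (d ∈ seen ∨ Dbl cs d)) := by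
  fun_induction altGo cs seen with
  | case1 seen =>
    intro hnd hlen
    simp only [Dbl, List.zip_nil_left]
    constructor
    · intro h
      simp at h
    · rintro ⟨c, d, hcd, hc, hd⟩
      simp only [List.not_mem_nil, or_false] at hc hd
      have : 2 ≤ seen.length := by
        rcases seen with _ | ⟨x, _ | ⟨y, t⟩⟩
        · simp at hc
        · simp only [List.mem_singleton] at hc hd
          exact absurd (hc.trans hd.symm) hcd
        · simp only [List.length_cons]; omega
      omega
  | case2 seen c rest run hrun seen' h2 =>
    intro hnd hlen
    have hrun : 1 + (rest.takeWhile (fun y => y = c)).length ≥ 2 := hrun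
    have hnd' : seen'.Nodup := PySem.Set.nodup_add seen c hnd
    obtain ⟨a, b, ha, hb, hab⟩ := nodup_two_mem seen' hnd' (by omega)
    have hne : rest.takeWhile (fun y => y = c) ≠ [] := by
      intro h; rw [h] at hrun; simp at hrun
    constructor
    · intro _
      refine ⟨a, b, hab, ?_, ?_⟩
      · rcases (PySem.Set.mem_add _ _ _).mp ha with h | hc
        · exact Or.inl h
        · exact Or.inr ((dbl_cons_run c rest a).mpr (Or.inl ⟨hc, hne⟩))
      · rcases (PySem.Set.mem_add _ _ _).mp hb with h | hc
        · exact Or.inl h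
        · exact Or.inr ((dbl_cons_run c rest b).mpr (Or.inl ⟨hc, hne⟩))
    · intro _; rfl
  | case3 seen c rest run rest' hrun seen' h2 ih =>
    intro hnd hlen
    have hrun : 1 + (rest.takeWhile (fun y => y = c)).length ≥ 2 := hrun
    have hnd' : seen'.Nodup := PySem.Set.nodup_add seen c hnd
    have hlen' : seen'.length ≤ 1 := by
      have hle : seen'.length ≤ seen.length + 1 := by
        show (PySem.Set.add seen c).length ≤ seen.length + 1
        rw [PySem.Set.add_eq_ite]
        split
        · omega
        · simp
      have hne2 : seen'.length ≠ 2 := h2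
      omega
    rw [ih hnd' hlen']
    have hne : rest.takeWhile (fun y => y = c) ≠ [] := by
      intro h; rw [h] at hrun; simp at hrun
    have hdb : ∀ x : Char, ((x ∈ seen ∨ Dbl (c :: rest) x) ↔
        (x ∈ seen' ∨ Dbl rest' x)) := by
      intro x
      rw [dbl_cons_run]
      constructor
      · rintro (h | (⟨rfl, -⟩ | h))
        · exact Or.inl ((PySem.Set.mem_add _ _ _).mpr (Or.inl h))
        · exact Or.inl ((PySem.Set.mem_add _ _ _).mpr (Or.inr rfl))
        · exact Or.inr h
      · rintro (h | h)
        · rcases (PySem.Set.mem_add _ _ _).mp h with h | hc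
          · exact Or.inl h
          · exact Or.inr (Or.inl ⟨hc, hne⟩)
        · exact Or.inr (Or.inr h)
    constructor
    · rintro ⟨a, b, hab, ha, hb⟩
      exact ⟨a, b, hab, (hdb a).mpr ha, (hdb b).mpr hb⟩
    · rintro ⟨a, b, hab, ha, hb⟩
      exact ⟨a, b, hab, (hdb a).mp ha, (hdb b).mp hb⟩
  | case4 seen c rest run rest' hrun ih =>
    intro hnd hlen
    have hrun : ¬ 1 + (rest.takeWhile (fun y => y = c)).length ≥ 2 := hrun
    rw [ih hnd hlen]
    have hempty : rest.takeWhile (fun y => y = c) = [] := by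
      by_contra h
      have : 1 ≤ (rest.takeWhile (fun y => y = c)).length := by
        rcases h' : rest.takeWhile (fun y => y = c) with _ | _
        · exact absurd h' h
        · simp
      omega
    have hdb : ∀ x : Char, (Dbl (c :: rest) x ↔ Dbl rest' x) := by
      intro x
      rw [dbl_cons_run]
      constructor
      · rintro (⟨rfl, h⟩ | h)
        · exact absurd hempty h
        · exact h
      · exact fun h => Or.inr h
    constructor
    · rintro ⟨a, b, hab, ha, hb⟩
      exact ⟨a, b, hab, Or.imp id (hdb a).mpr ha, Or.imp id (hdb b).mpr hb⟩
    · rintro ⟨a, b, hab, ha, hb⟩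
      exact ⟨a, b, hab, Or.imp id (hdb a).mp ha, Or.imp id (hdb b).mp hb⟩

theorem pairsLetters_alt_iff (s : String) :
    pairsLetters_alt s = true ↔ TwoPairs s.toList := by
  unfold pairsLetters_alt
  rw [altGo_iff s.toList PySem.Set.empty (by simp [PySem.Set.empty]) (by simp [PySem.Set.empty])]
  unfold TwoPairs
  constructor
  · rintro ⟨c, d, hcd, hc, hd⟩
    simp only [PySem.Set.empty, List.not_mem_nil, false_or] at hc hd
    exact ⟨c, d, hcd, hc, hd⟩
  · rintro ⟨c, d, hcd, hc, hd⟩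
    exact ⟨c, d, hcd, Or.inr hc, Or.inr hd⟩

-- ===== VERDICT (by name: the statement is the Claim_ definition above) =====
theorem pairsLetters_spec : Claim_equal_pairsLetters := by
  intro s _
  unfold Spec_pairsLetters
  have ha := pairsLetters_iff s
  have hb := pairsLetters_alt_iff s
  cases h1 : pairsLetters s <;> cases h2 : pairsLetters_alt s <;> simp_all
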